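-- pv_equiv track=rewrite | github.com/FACT-Development-Team/FACT | FACTLIB/OEIS Processing/Code/twoD/supportFunctions_v12.py | check_words
-- ===== SOURCE A (Python) =====
-- def check_words(dataRow, words):
--
--     results = []
--
--     for col in dataRow:
--         if col == None or col == "":
--             results.append(4)
--         else:
--             results.append(0)
--             for word in words:
--                 if word in col.lower():
--                     results[-1] = 1
--                     break
--
--     assert len(dataRow) == len(results)
--     return results
-- ===== SOURCE B (Python) =====
-- def check_words(dataRow, words):
--     # Loop order swapped: lowercase each column once, then sweep the word list
--     # once, flagging columns; per-column word loop disappears as a structure.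
--     lows = [None if col is None or col == "" else col.lower() for col in dataRow]
--     flags = [4 if low is None else 0 for low in lows]
--     for word in words:
--         flags = [1 if (low is not None and f == 0 and word in low) else f
--                  for f, low in zip(flags, lows)]
--     return flags
-- ===== Notes on version B (the rewrite author's own statement) =====
-- stated objective: alternative
-- what changed: B swaps the loop order: it lowercases every column once, initialises a per-column flag list, then makes one sweep per word over all columns updating flags, instead of A's per-column inner scan over words with a break; col.lower() is hoisted out of the word loop.
import Mathlib
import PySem

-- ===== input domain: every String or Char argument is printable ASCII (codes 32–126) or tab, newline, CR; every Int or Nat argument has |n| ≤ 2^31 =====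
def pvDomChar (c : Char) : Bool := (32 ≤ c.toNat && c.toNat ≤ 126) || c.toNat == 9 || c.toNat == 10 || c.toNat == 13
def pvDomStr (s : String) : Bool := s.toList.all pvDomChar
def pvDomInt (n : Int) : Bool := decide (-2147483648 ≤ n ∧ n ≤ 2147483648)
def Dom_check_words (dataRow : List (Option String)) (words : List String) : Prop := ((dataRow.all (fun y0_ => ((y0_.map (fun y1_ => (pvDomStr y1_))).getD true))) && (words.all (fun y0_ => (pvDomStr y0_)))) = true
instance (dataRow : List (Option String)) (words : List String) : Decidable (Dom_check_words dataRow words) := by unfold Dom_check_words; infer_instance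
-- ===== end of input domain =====

-- B swaps the loop order (one sweep per word over pre-lowered columns) instead of A's per-column word scan; same cost class, lower() hoisted.
-- ===== PORT A =====
-- inner 'for word in words: if word in col.lower(): results[-1] = 1; break'
def checkWordsInner (results : List Int) (s : String) : List String → List Int
  | [] => results
  | word :: rest =>
      if PySem.Str.isIn word (PySem.Str.lower s) then results.set (results.length - 1) 1
      else checkWordsInner results s rest

def check_words (dataRow : List (Option String)) (words : List String) : List Int :=
  dataRow.foldl (fun results col =>
    match col with
    | none => results ++ [4]
    | some s =>
        if s = "" then results ++ [4]
        else checkWordsInner (results ++ [0]) s words) []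

-- ===== PORT B =====
def check_words_alt (dataRow : List (Option String)) (words : List String) : List Int :=
  let lows : List (Option String) := dataRow.map (fun col =>
    match col with
    | none => none
    | some s => if s = "" then none else some (PySem.Str.lower s))
  let flags : List Int := lows.map (fun low =>
    match low with
    | none => 4
    | some _ => 0)
  words.foldl (fun flags word =>
    (flags.zip lows).map (fun fl =>
      match fl.2 with
      | some low => if fl.1 = 0 ∧ PySem.Str.isIn word low then 1 else fl.1
      | none => fl.1)) flags

-- ===== PRECONDITION & SPEC =====
def Spec_check_words (dataRow : List (Option String)) (words : List String) (out : List Int) : Prop := out = check_words_alt dataRow words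
instance (dataRow : List (Option String)) (words : List String) (out : List Int) : Decidable (Spec_check_words dataRow words out) := by unfold Spec_check_words; infer_instance

-- ===== CLAIM (what is proved, stated in full; the proofs are below) =====
def Claim_equal_check_words : Prop := ∀ (dataRow : List (Option String)) (words : List String), Dom_check_words dataRow words → Spec_check_words dataRow words (check_words dataRow words)

-- ===== LEMMAS AND PROOFS =====

-- the per-column answer both programs compute: 4 for missing/empty, 1 if some word occurs, else 0
def cwRes (ws : List String) (low : Option String) : Int :=
  match low with
  | none => 4
  | some l => if ws.any (fun w => PySem.Str.isIn w l) then 1 else 0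

-- normalise a raw column to its lowered form (B's `lows` entry)
def cwLow (col : Option String) : Option String :=
  match col with
  | none => none
  | some s => if s = "" then none else some (PySem.Str.lower s)

theorem cw_inner_eq (rs : List Int) (s : String) (ws : List String) :
    checkWordsInner (rs ++ [0]) s ws
      = rs ++ [if ws.any (fun w => PySem.Str.isIn w (PySem.Str.lower s)) then 1 else 0] := by
  induction ws with
  | nil => simp [checkWordsInner]
  | cons w t ih =>
      by_cases h : PySem.Chars.isIn w.toList (PySem.Chars.lower s.toList) = true
      · simp [checkWordsInner, h]
      · simp [checkWordsInner, h, ih]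

theorem cw_A_eq (dataRow : List (Option String)) (words : List String) (acc : List Int) :
    dataRow.foldl (fun results col =>
      match col with
      | none => results ++ [4]
      | some s => if s = "" then results ++ [4] else checkWordsInner (results ++ [0]) s words) acc
      = acc ++ dataRow.map (fun col => cwRes words (cwLow col)) := by
  induction dataRow generalizing acc with
  | nil => simp
  | cons col t ih =>
      cases col with
      | none =>
          simp only [List.foldl_cons]
          rw [ih]; simp [cwLow, cwRes]
      | some s =>
          by_cases h : s = ""
          · simp only [List.foldl_cons, h]
            rw [ih]; simp [cwLow, cwRes]
          · simp only [List.foldl_cons, if_neg h]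
            rw [cw_inner_eq, ih]
            simp [cwLow, cwRes, h]

theorem cw_step_eq (lows : List (Option String)) (ws : List String) (w : String) :
    ((lows.map (cwRes ws)).zip lows).map (fun fl =>
      match fl.2 with
      | some low => if fl.1 = 0 ∧ PySem.Str.isIn w low then 1 else fl.1
      | none => fl.1) = lows.map (cwRes (ws ++ [w])) := by
  induction lows with
  | nil => rfl
  | cons low t ih =>
      simp only [List.map_cons, List.zip_cons_cons, ih]
      cases low with
      | none => simp [cwRes]
      | some l =>
          by_cases ha : ∃ x ∈ ws, PySem.Chars.isIn x.toList l.toList = true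
          · simp [cwRes, ha]
          · by_cases hw : PySem.Chars.isIn w.toList l.toList = true
            · simp [cwRes, ha, hw]
            · simp [cwRes, ha, hw]

theorem cw_B_fold (lows : List (Option String)) (words ws : List String) :
    words.foldl (fun flags word =>
      (flags.zip lows).map (fun fl =>
        match fl.2 with
        | some low => if fl.1 = 0 ∧ PySem.Str.isIn word low then 1 else fl.1
        | none => fl.1)) (lows.map (cwRes ws)) = lows.map (cwRes (ws ++ words)) := by
  induction words generalizing ws with
  | nil => simp
  | cons w t ih =>
      simp only [List.foldl_cons, cw_step_eq]
      simpa using ih (ws ++ [w])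

theorem cw_eq (dataRow : List (Option String)) (words : List String) :
    check_words dataRow words = check_words_alt dataRow words := by
  unfold check_words check_words_alt
  rw [cw_A_eq]
  have hlow : dataRow.map (fun col =>
      match col with
      | none => none
      | some s => if s = "" then none else some (PySem.Str.lower s)) = dataRow.map cwLow := rfl
  have hinit : (dataRow.map cwLow).map (fun low =>
      match low with
      | none => (4 : Int)
      | some _ => 0) = (dataRow.map cwLow).map (cwRes []) := by
    apply List.map_congr_left; intro low _; cases low <;> simp [cwRes]
  simp only [hlow, hinit, cw_B_fold (dataRow.map cwLow) words []]
  simp [List.map_map, Function.comp]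

-- ===== VERDICT (by name: the statement is the Claim_ definition above) =====
theorem check_words_spec : Claim_equal_check_words := by
  intro dataRow words _
  unfold Spec_check_words
  exact cw_eq dataRow words
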